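-- pv_equiv track=rewrite | github.com/kalevhark/rfk | main/views.py | calc_dblevel1_qualifiers
-- ===== SOURCE A (Python) =====
-- def calc_dblevel1_qualifiers(codeset):
--     rfk_set = dict()
--     for d_code in range(1, 10):
--         rfk_set[f'd{d_code}'] = dict()
--         rfk_set[f'd{d_code}']['d_qualifier'] = ''
--         for b_code in range(1, 9):
--             rfk_set[f'd{d_code}'][f'b{b_code}'] = ''
--     for code_pair in codeset:
--         if code_pair[0][0] == 'd' and code_pair[1][0] == 'b': # ainult kui on d ja b koodipaar
--             d_code, d_qualifier = code_pair[0].split('.')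
--             b_code, b_qualifier = code_pair[1].split('.')
--             if (rfk_set[d_code[:2]]['d_qualifier'] < d_qualifier):
--                 rfk_set[d_code[:2]]['d_qualifier'] = d_qualifier
--             if (rfk_set[d_code[:2]][b_code[:2]] < b_qualifier):
--                 rfk_set[d_code[:2]][b_code[:2]] = b_qualifier
--     return rfk_set
-- ===== SOURCE B (Python) =====
-- from collections import defaultdict
--
--
-- def calc_dblevel1_qualifiers(codeset):
--     # collect: one flat list of (slot, qualifier) contributions
--     entries = []
--     for x, y in codeset:
--         if x[0] == 'd' and y[0] == 'b':
--             d_code, d_qualifier = x.split('.')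
--             b_code, b_qualifier = y.split('.')
--             entries.append(((d_code[:2], 'd_qualifier'), d_qualifier))
--             entries.append(((d_code[:2], b_code[:2]), b_qualifier))
--     # group contributions per slot
--     groups = defaultdict(list)
--     for key, val in entries:
--         groups[key].append(val)
--     # reduce: build the fixed skeleton directly, writing each slot's max
--     return {f'd{d}': {slot: max(groups[(f'd{d}', slot)], default='')
--                       for slot in ['d_qualifier'] + [f'b{b}' for b in range(1, 9)]}
--             for d in range(1, 10)}
-- ===== Notes on version B (the rewrite author's own statement) =====
-- stated objective: alternative
-- what changed: A maintains a running max by mutating the skeleton dict inside the single pass; B first collects every (slot, qualifier) contribution into a flat list, groups it per slot with a defaultdict, and then builds the whole skeleton in one comprehension writing max(group, default='') into each slot.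
-- outside the precondition, e.g. on calc_dblevel1_qualifiers([('d1', 'b1.x')]): A raises ValueError, B raises ValueError; on calc_dblevel1_qualifiers([('d0.q', 'b1.x')]): A raises KeyError; on calc_dblevel1_qualifiers([('', 'b1.x')]): A raises IndexError, B raises IndexError
import Mathlib
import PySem

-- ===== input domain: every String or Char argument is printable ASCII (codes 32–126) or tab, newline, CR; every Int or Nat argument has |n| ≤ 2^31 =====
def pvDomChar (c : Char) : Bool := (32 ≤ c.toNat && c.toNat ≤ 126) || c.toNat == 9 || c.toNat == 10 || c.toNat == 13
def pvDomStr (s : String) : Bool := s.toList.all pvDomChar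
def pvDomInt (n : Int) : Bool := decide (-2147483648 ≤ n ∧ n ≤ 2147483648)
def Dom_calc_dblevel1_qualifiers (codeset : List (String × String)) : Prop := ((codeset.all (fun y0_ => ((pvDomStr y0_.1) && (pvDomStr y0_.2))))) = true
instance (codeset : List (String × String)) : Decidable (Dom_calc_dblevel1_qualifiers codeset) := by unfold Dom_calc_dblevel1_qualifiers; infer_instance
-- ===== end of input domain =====

-- B replaces A's single-pass running-max dict mutation by a collect / group / per-slot-max
-- comprehension (objective: alternative decomposition, same cost).


-- ===== PORT A =====
-- skeleton: rfk_set = {'d1': {'d_qualifier': '', 'b1': '', …, 'b8': ''}, …, 'd9': {…}}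
def pvSkeleton : PySem.Dict String (PySem.Dict String String) :=
  (PySem.List.pyRange 1 10 1).foldl (fun rfk d =>
    let key := "d" ++ PySem.Int.toStr d
    let rfk := rfk.insert key PySem.Dict.empty
    let rfk := rfk.modify key PySem.Dict.empty (fun inner => inner.insert "d_qualifier" "")
    (PySem.List.pyRange 1 9 1).foldl (fun rfk b =>
      rfk.modify key PySem.Dict.empty (fun inner => inner.insert ("b" ++ PySem.Int.toStr b) "")) rfk)
    PySem.Dict.empty

-- one iteration of A's 'for code_pair in codeset' loop (split/lookup totalised with defaults;
-- Pre_ excludes the inputs where Python would raise there)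
def pvRunOne (st : PySem.Dict String (PySem.Dict String String)) (p : String × String) :
    PySem.Dict String (PySem.Dict String String) :=
  if p.1.toList.headD ' ' == 'd' && p.2.toList.headD ' ' == 'b' then
    let dparts := (PySem.Str.split? p.1 ".").getD []
    let d_code := dparts.getD 0 ""
    let d_qualifier := dparts.getD 1 ""
    let bparts := (PySem.Str.split? p.2 ".").getD []
    let b_code := bparts.getD 0 ""
    let b_qualifier := bparts.getD 1 ""
    let dk := String.ofList (PySem.List.slice d_code.toList none (some 2))
    let bk := String.ofList (PySem.List.slice b_code.toList none (some 2))
    let st1 :=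
      if (st.getD dk PySem.Dict.empty).getD "d_qualifier" "" < d_qualifier then
        st.modify dk PySem.Dict.empty (fun inner => inner.insert "d_qualifier" d_qualifier)
      else st
    if (st1.getD dk PySem.Dict.empty).getD bk "" < b_qualifier then
      st1.modify dk PySem.Dict.empty (fun inner => inner.insert bk b_qualifier)
    else st1
  else st

def calc_dblevel1_qualifiers (codeset : List (String × String)) : List (String × List (String × String)) :=
  ((codeset.foldl pvRunOne pvSkeleton).items).map (fun kv => (kv.1, kv.2.items))

-- ===== PORT B =====
def calc_dblevel1_qualifiers_alt (codeset : List (String × String)) : List (String × List (String × String)) :=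
  let entries := codeset.foldl (fun acc p =>
    if p.1.toList.headD ' ' == 'd' && p.2.toList.headD ' ' == 'b' then
      let dparts := (PySem.Str.split? p.1 ".").getD []
      let d_code := dparts.getD 0 ""
      let d_qualifier := dparts.getD 1 ""
      let bparts := (PySem.Str.split? p.2 ".").getD []
      let b_code := bparts.getD 0 ""
      let b_qualifier := bparts.getD 1 ""
      let dk := String.ofList (PySem.List.slice d_code.toList none (some 2))
      let bk := String.ofList (PySem.List.slice b_code.toList none (some 2))
      acc ++ [((dk, "d_qualifier"), d_qualifier), ((dk, bk), b_qualifier)]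
    else acc) []
  let groups := entries.foldl (fun d e => d.modify e.1 [] (fun v => v ++ [e.2])) PySem.Dict.empty
  let slots := "d_qualifier" :: (PySem.List.pyRange 1 9 1).map (fun b => "b" ++ PySem.Int.toStr b)
  (PySem.List.pyRange 1 10 1).map (fun d =>
    ("d" ++ PySem.Int.toStr d,
     slots.map (fun s =>
       (s, PySem.List.maxD (groups.getD ("d" ++ PySem.Int.toStr d, s) []) (fun y => y) ""))))

-- ===== PRECONDITION & SPEC =====
def pvD9 : List String := ["d1","d2","d3","d4","d5","d6","d7","d8","d9"]
def pvB8 : List String := ["b1","b2","b3","b4","b5","b6","b7","b8"]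

-- Pre_ excludes exactly the pairs on which A raises: an empty first string (IndexError), an
-- empty second string after a 'd' head (IndexError), and — for a 'd'/'b' pair — a side whose
-- split('.') does not have exactly two parts (ValueError) or whose 2-char code prefix is not a
-- skeleton key d1–d9 / b1–b8 (KeyError).
def Pre_calc_dblevel1_qualifiers (codeset : List (String × String)) : Prop :=
  ∀ p ∈ codeset, p.1 ≠ "" ∧ (p.1.toList.headD ' ' = 'd' →
    p.2 ≠ "" ∧ (p.2.toList.headD ' ' = 'b' →
      ((PySem.Str.split? p.1 ".").getD []).length = 2 ∧
      ((PySem.Str.split? p.2 ".").getD []).length = 2 ∧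
      String.ofList (PySem.List.slice (((PySem.Str.split? p.1 ".").getD []).getD 0 "").toList none (some 2)) ∈ pvD9 ∧
      String.ofList (PySem.List.slice (((PySem.Str.split? p.2 ".").getD []).getD 0 "").toList none (some 2)) ∈ pvB8))
instance (codeset : List (String × String)) : Decidable (Pre_calc_dblevel1_qualifiers codeset) := by
  unfold Pre_calc_dblevel1_qualifiers; infer_instance

def pvWitness_calc_dblevel1_qualifiers : (List (String × String)) :=
  [("d1.A", "b2.B"), ("x", "y"), ("d13.Q", "b2.C")]

def Spec_calc_dblevel1_qualifiers (codeset : List (String × String)) (out : List (String × List (String × String))) : Prop := out = calc_dblevel1_qualifiers_alt codeset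
instance (codeset : List (String × String)) (out : List (String × List (String × String))) : Decidable (Spec_calc_dblevel1_qualifiers codeset out) := by unfold Spec_calc_dblevel1_qualifiers; infer_instance

-- ===== CLAIM (what is proved, stated in full; the proofs are below) =====
def Claim_equal_calc_dblevel1_qualifiers : Prop := ∀ (codeset : List (String × String)), Dom_calc_dblevel1_qualifiers codeset → Pre_calc_dblevel1_qualifiers codeset → Spec_calc_dblevel1_qualifiers codeset (calc_dblevel1_qualifiers codeset)


-- ===== LEMMAS AND PROOFS =====

-- proof-side abbreviations for the pieces both ports parse out of a code pair
def pvGuard (p : String × String) : Bool :=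
  p.1.toList.headD ' ' == 'd' && p.2.toList.headD ' ' == 'b'
def pvCode (s : String) : String :=
  String.ofList (PySem.List.slice (((PySem.Str.split? s ".").getD []).getD 0 "").toList none (some 2))
def pvQual (s : String) : String := ((PySem.Str.split? s ".").getD []).getD 1 ""
def pvEnt (p : String × String) : List ((String × String) × String) :=
  if pvGuard p then
    [((pvCode p.1, "d_qualifier"), pvQual p.1), ((pvCode p.1, pvCode p.2), pvQual p.2)]
  else []
def pvSlots : List String := "d_qualifier" :: pvB8
def pvSt2 (st : PySem.Dict String (PySem.Dict String String)) (k s : String) : String :=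
  (st.getD k PySem.Dict.empty).getD s ""
def pvM (l : List (String × String)) (ks : String × String) : String :=
  (List.map (fun e => e.2) (List.filter (fun e => e.1 == ks) (l.flatMap pvEnt))).foldl max ""

theorem pvStr_nil_le (x : String) : ("" : String) ≤ x := by
  apply le_of_not_gt
  rw [String.lt_iff_toList_lt]
  intro h
  have h2 : x.toList < [] := h
  generalize x.toList = l at h2
  cases h2

theorem pvMaxD_eq_foldl (v : List String) :
    PySem.List.maxD v (fun y => y) "" = v.foldl max "" := by
  cases v with
  | nil => rfl
  | cons x t =>
    simp only [PySem.List.maxD, PySem.List.max?_id_cons, Option.getD_some, List.foldl_cons,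
      max_eq_right (pvStr_nil_le x)]

theorem pvRunOne_eq (st : PySem.Dict String (PySem.Dict String String)) (p : String × String) :
    pvRunOne st p =
      if pvGuard p then
        let st1 :=
          if (st.getD (pvCode p.1) PySem.Dict.empty).getD "d_qualifier" "" < pvQual p.1 then
            st.modify (pvCode p.1) PySem.Dict.empty
              (fun inner => inner.insert "d_qualifier" (pvQual p.1))
          else st
        if (st1.getD (pvCode p.1) PySem.Dict.empty).getD (pvCode p.2) "" < pvQual p.2 then
          st1.modify (pvCode p.1) PySem.Dict.empty
            (fun inner => inner.insert (pvCode p.2) (pvQual p.2))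
        else st1
      else st := rfl

-- B's collect loop builds exactly the flatMap of per-pair contributions
theorem pvEntriesFold (l : List (String × String)) (acc : List ((String × String) × String)) :
    l.foldl (fun acc p =>
      if p.1.toList.headD ' ' == 'd' && p.2.toList.headD ' ' == 'b' then
        let dparts := (PySem.Str.split? p.1 ".").getD []
        let d_code := dparts.getD 0 ""
        let d_qualifier := dparts.getD 1 ""
        let bparts := (PySem.Str.split? p.2 ".").getD []
        let b_code := bparts.getD 0 ""
        let b_qualifier := bparts.getD 1 ""
        let dk := String.ofList (PySem.List.slice d_code.toList none (some 2))
        let bk := String.ofList (PySem.List.slice b_code.toList none (some 2))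
        acc ++ [((dk, "d_qualifier"), d_qualifier), ((dk, bk), b_qualifier)]
      else acc) acc = acc ++ l.flatMap pvEnt := by
  induction l generalizing acc with
  | nil => simp
  | cons p l ih =>
    rw [List.foldl_cons, List.flatMap_cons]
    simp only [show (p.1.toList.headD ' ' == 'd' && p.2.toList.headD ' ' == 'b') = pvGuard p
      from rfl, pvEnt]
    by_cases g : pvGuard p = true
    · rw [if_pos g, if_pos g, ih]
      simp [pvCode, pvQual]
    · rw [if_neg g, if_neg g, ih]
      simp

-- keys/inner-keys/value effect of one slot write rfk[dk][slot] = v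
theorem pvUpd_keys (st : PySem.Dict String (PySem.Dict String String)) (dk slot v : String)
    (h1 : st.keys = pvD9) (hdk : dk ∈ pvD9) :
    (st.modify dk PySem.Dict.empty (fun inner => inner.insert slot v)).keys = pvD9 := by
  rw [PySem.Dict.keys_modify, PySem.Dict.keys_insert_of_contains, h1]
  rw [PySem.Dict.contains_iff_mem_keys, h1]; exact hdk

theorem pvUpd_inner_keys (st : PySem.Dict String (PySem.Dict String String)) (dk slot v : String)
    (h2 : ∀ k ∈ pvD9, (st.getD k PySem.Dict.empty).keys = pvSlots)
    (hdk : dk ∈ pvD9) (hs : slot ∈ pvSlots) :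
    ∀ k ∈ pvD9,
      ((st.modify dk PySem.Dict.empty (fun inner => inner.insert slot v)).getD k
        PySem.Dict.empty).keys = pvSlots := by
  intro k hk
  rw [PySem.Dict.getD_modify]
  by_cases hkdk : k = dk
  · rw [if_pos hkdk, PySem.Dict.keys_insert_of_contains, h2 dk hdk]
    rw [PySem.Dict.contains_iff_mem_keys, h2 dk hdk]; exact hs
  · rw [if_neg hkdk]; exact h2 k hk

theorem pvUpd_st2 (st : PySem.Dict String (PySem.Dict String String)) (dk slot v k s : String) :
    pvSt2 (st.modify dk PySem.Dict.empty (fun inner => inner.insert slot v)) k s =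
      if k = dk then (if s = slot then v else pvSt2 st k s) else pvSt2 st k s := by
  unfold pvSt2
  rw [PySem.Dict.getD_modify]
  split_ifs with hk hs
  · rw [hs, PySem.Dict.getD_insert_self]
  · rw [PySem.Dict.getD_insert_of_ne _ _ _ hs, hk]
  · rfl

-- one conditional running-max write, as A's loop body performs it
theorem pvCondUpd (st : PySem.Dict String (PySem.Dict String String)) (dk slot v : String)
    (h1 : st.keys = pvD9) (h2 : ∀ k ∈ pvD9, (st.getD k PySem.Dict.empty).keys = pvSlots)
    (hdk : dk ∈ pvD9) (hs : slot ∈ pvSlots) :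
    (if (st.getD dk PySem.Dict.empty).getD slot "" < v then
        st.modify dk PySem.Dict.empty (fun inner => inner.insert slot v) else st).keys = pvD9 ∧
    (∀ k ∈ pvD9,
      ((if (st.getD dk PySem.Dict.empty).getD slot "" < v then
          st.modify dk PySem.Dict.empty (fun inner => inner.insert slot v) else st).getD k
        PySem.Dict.empty).keys = pvSlots) ∧
    (∀ k s, pvSt2 (if (st.getD dk PySem.Dict.empty).getD slot "" < v then
          st.modify dk PySem.Dict.empty (fun inner => inner.insert slot v) else st) k s =
      if k = dk ∧ s = slot then max (pvSt2 st k s) v else pvSt2 st k s) := by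
  split_ifs with hc
  · refine ⟨pvUpd_keys st dk slot v h1 hdk, pvUpd_inner_keys st dk slot v h2 hdk hs, ?_⟩
    intro k s
    rw [pvUpd_st2]
    by_cases hk : k = dk
    · by_cases hss : s = slot
      · rw [if_pos hk, if_pos hss, if_pos ⟨hk, hss⟩, hk, hss]
        exact (max_eq_right (le_of_lt hc)).symm
      · have hns : ¬(k = dk ∧ s = slot) := fun h => hss h.2
        rw [if_pos hk, if_neg hss, if_neg hns]
    · have hnk : ¬(k = dk ∧ s = slot) := fun h => hk h.1
      rw [if_neg hk, if_neg hnk]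
  · refine ⟨h1, h2, ?_⟩
    intro k s
    by_cases hk : k = dk ∧ s = slot
    · rw [if_pos hk, hk.1, hk.2]
      exact (max_eq_left (not_lt.mp hc)).symm
    · rw [if_neg hk]

-- net effect of A's two conditional writes on one slot vs that pair's contribution list
theorem pvTwoIf (dk bk k s cur dq bq : String) (hbne : bk ≠ "d_qualifier") :
    (if k = dk ∧ s = bk then
        max (if k = dk ∧ s = "d_qualifier" then max cur dq else cur) bq
      else if k = dk ∧ s = "d_qualifier" then max cur dq else cur) =
      (List.map (fun e => e.2) (List.filter (fun e => e.1 == (k, s))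
        [((dk, ("d_qualifier" : String)), dq), ((dk, bk), bq)])).foldl max cur := by
  by_cases hk : k = dk
  · by_cases h1 : s = "d_qualifier"
    · subst hk; subst h1
      simp [hbne, Ne.symm hbne]
    · by_cases h2 : s = bk
      · subst hk; subst h2
        have h1' : ("d_qualifier" : String) ≠ s := fun h => h1 h.symm
        simp [h1, h1']
      · subst hk
        have h1' : ("d_qualifier" : String) ≠ s := fun h => h1 h.symm
        have h2' : bk ≠ s := fun h => h2 h.symm
        simp [h1, h2, h1', h2']
  · have hk' : dk ≠ k := fun h => hk h.symm
    simp [hk, hk']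

-- A's loop invariant: keys stay the fixed skeleton and every slot holds the running max
theorem pvAinv (l : List (String × String)) :
    ∀ st, Pre_calc_dblevel1_qualifiers l →
    st.keys = pvD9 → (∀ k ∈ pvD9, (st.getD k PySem.Dict.empty).keys = pvSlots) →
    (l.foldl pvRunOne st).keys = pvD9 ∧
    (∀ k ∈ pvD9, ((l.foldl pvRunOne st).getD k PySem.Dict.empty).keys = pvSlots) ∧
    (∀ k ∈ pvD9, ∀ s ∈ pvSlots,
      pvSt2 (l.foldl pvRunOne st) k s =
        (List.map (fun e => e.2) (List.filter (fun e => e.1 == (k, s)) (l.flatMap pvEnt))).foldl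
          max (pvSt2 st k s)) := by
  induction l with
  | nil =>
    intro st _ h1 h2
    exact ⟨h1, h2, fun k _ s _ => by simp⟩
  | cons p l ih =>
    intro st hPre h1 h2
    have hPre' : Pre_calc_dblevel1_qualifiers l := fun q hq => hPre q (List.mem_cons_of_mem _ hq)
    rw [List.foldl_cons]
    by_cases g : pvGuard p = true
    · -- valid d/b pair: two conditional slot writes
      have hg := g
      rw [pvGuard, Bool.and_eq_true, beq_iff_eq, beq_iff_eq] at hg
      obtain ⟨hne1, himp⟩ := hPre p (by simp)
      obtain ⟨hne2, himp2⟩ := himp hg.1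
      obtain ⟨_, _, hdk, hbk⟩ := himp2 hg.2
      have hdk' : pvCode p.1 ∈ pvD9 := hdk
      have hbk' : pvCode p.2 ∈ pvB8 := hbk
      have hbkS : pvCode p.2 ∈ pvSlots := List.mem_cons_of_mem _ hbk'
      have hbne : pvCode p.2 ≠ "d_qualifier" := by
        intro h; rw [h] at hbk'; exact absurd hbk' (by decide)
      obtain ⟨s1a, s1b, s1c⟩ := pvCondUpd st (pvCode p.1) "d_qualifier" (pvQual p.1) h1 h2 hdk'
        (by decide)
      obtain ⟨s2a, s2b, s2c⟩ := pvCondUpd _ (pvCode p.1) (pvCode p.2) (pvQual p.2) s1a s1b hdk'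
        hbkS
      rw [pvRunOne_eq, if_pos g]
      obtain ⟨k1, k2, k3⟩ := ih _ hPre' s2a s2b
      refine ⟨k1, k2, fun k hk s hs => ?_⟩
      rw [k3 k hk s hs, List.flatMap_cons, List.filter_append, List.map_append,
        List.foldl_append]
      congr 1
      simp only [s2c, s1c]
      rw [pvEnt, if_pos g]
      exact pvTwoIf (pvCode p.1) (pvCode p.2) k s (pvSt2 st k s) (pvQual p.1) (pvQual p.2) hbne
    · -- guard false: the pair contributes nothing and the state is unchanged
      have hrun : pvRunOne st p = st := by rw [pvRunOne_eq, if_neg g]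
      rw [hrun]
      obtain ⟨k1, k2, k3⟩ := ih st hPre' h1 h2
      refine ⟨k1, k2, fun k hk s hs => ?_⟩
      rw [k3 k hk s hs, List.flatMap_cons, pvEnt, if_neg g]
      simp

set_option maxRecDepth 20000 in
theorem pvSkeleton_keys : pvSkeleton.keys = pvD9 := by decide

set_option maxRecDepth 20000 in
theorem pvSkeleton_inner_keys :
    ∀ k ∈ pvD9, (pvSkeleton.getD k PySem.Dict.empty).keys = pvSlots := by decide

set_option maxRecDepth 20000 in
theorem pvSkeleton_st2 : ∀ k ∈ pvD9, ∀ s ∈ pvSlots, pvSt2 pvSkeleton k s = "" := by decide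

theorem pvA_canon (codeset : List (String × String))
    (hPre : Pre_calc_dblevel1_qualifiers codeset) :
    calc_dblevel1_qualifiers codeset =
      pvD9.map (fun k => (k, pvSlots.map (fun s => (s, pvM codeset (k, s))))) := by
  obtain ⟨k1, k2, k3⟩ :=
    pvAinv codeset pvSkeleton hPre pvSkeleton_keys pvSkeleton_inner_keys
  unfold calc_dblevel1_qualifiers
  have hnd : (codeset.foldl pvRunOne pvSkeleton).keys.Nodup := by rw [k1]; decide
  rw [PySem.Dict.items_eq_map_keys _ hnd PySem.Dict.empty, k1, List.map_map]
  refine List.map_congr_left (fun k hk => ?_)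
  have hnd2 : ((codeset.foldl pvRunOne pvSkeleton).getD k PySem.Dict.empty).keys.Nodup := by
    rw [k2 k hk]; decide
  simp only [Function.comp]
  rw [PySem.Dict.items_eq_map_keys _ hnd2 "", k2 k hk]
  refine congrArg _ (List.map_congr_left (fun s hs => ?_))
  have hv := k3 k hk s hs
  rw [pvSkeleton_st2 k hk s hs] at hv
  exact congrArg _ hv

theorem pvB_canon (codeset : List (String × String)) :
    calc_dblevel1_qualifiers_alt codeset =
      pvD9.map (fun k => (k, pvSlots.map (fun s => (s, pvM codeset (k, s))))) := by
  unfold calc_dblevel1_qualifiers_alt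
  simp only [pvEntriesFold, List.nil_append, PySem.Dict.getD_foldl_modify_append,
    PySem.Dict.getD_empty, pvMaxD_eq_foldl]
  rw [show pvD9 = ([1, 2, 3, 4, 5, 6, 7, 8, 9] : List Int).map
      (fun d => "d" ++ PySem.Int.toStr d) from by decide, List.map_map]
  rw [show PySem.List.pyRange 1 10 1 = ([1, 2, 3, 4, 5, 6, 7, 8, 9] : List Int) from by decide]
  refine List.map_congr_left (fun d _ => ?_)
  rw [show "d_qualifier" :: (PySem.List.pyRange 1 9 1).map (fun b => "b" ++ PySem.Int.toStr b) =
      pvSlots from by decide]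
  simp only [Function.comp, pvM]

-- ===== VERDICT (by name: the statement is the Claim_ definition above) =====
theorem calc_dblevel1_qualifiers_spec : Claim_equal_calc_dblevel1_qualifiers := by
  intro codeset _hDom hPre
  unfold Spec_calc_dblevel1_qualifiers
  rw [pvA_canon codeset hPre, pvB_canon codeset]
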